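-- pv_equiv track=rewrite | github.com/claudiodacruz/listasAPE | Lista Comp 07/Lista Comp07_ex07.py | transf
-- ===== SOURCE A (Python) =====
-- def transf(m):
--     n = []
--
--     for i in range(4):
--         linha = []
--         for j in range(5):
--             k = m[i][j]
--             if i == 0 or i == 3 or j ==0 or j == 4:
--                 linha.append(0)
--             else:
--                 linha.append(k)
--         n.append(linha)
--     return n
-- ===== SOURCE B (Python) =====
-- def transf(m):
--     n = [[m[i][j] for j in range(5)] for i in range(4)]
--     n[0] = [0] * 5
--     n[3] = [0] * 5
--     for i in range(4):
--         n[i][0] = 0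
--         n[i][4] = 0
--     return n
-- ===== Notes on version B (the rewrite author's own statement) =====
-- stated objective: alternative
-- what changed: A decides per cell with a border test inside a nested loop; B first builds a full copy with a nested comprehension and then overwrites the frame (rows 0 and 3, columns 0 and 4) in a separate pass.
import Mathlib
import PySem

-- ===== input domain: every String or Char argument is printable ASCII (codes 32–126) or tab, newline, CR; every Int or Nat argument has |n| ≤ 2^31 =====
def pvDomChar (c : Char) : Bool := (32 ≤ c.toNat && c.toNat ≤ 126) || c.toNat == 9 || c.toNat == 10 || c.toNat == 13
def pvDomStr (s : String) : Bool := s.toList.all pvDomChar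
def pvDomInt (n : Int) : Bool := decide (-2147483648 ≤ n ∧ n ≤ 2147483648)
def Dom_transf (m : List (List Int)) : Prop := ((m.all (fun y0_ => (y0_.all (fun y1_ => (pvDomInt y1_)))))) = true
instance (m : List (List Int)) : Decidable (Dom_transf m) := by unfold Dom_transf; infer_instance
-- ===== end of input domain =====

-- B copies the matrix first and then zeroes the frame in a second pass, instead of A's per-cell border test.

-- ===== PORT A =====
-- per-cell: k = m[i][j]; append 0 on the frame, k otherwise (pyGetD's default is only
-- reached outside Pre_transf, where Python raises IndexError)
def transf (m : List (List Int)) : List (List Int) :=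
  (PySem.List.pyRange 0 4 1).foldl (fun n i =>
    n ++ [((PySem.List.pyRange 0 5 1).foldl (fun linha j =>
      let k := PySem.List.pyGetD (PySem.List.pyGetD m i []) j 0
      if i == 0 || i == 3 || j == 0 || j == 4 then linha ++ [0] else linha ++ [k]) [])]) []

-- ===== PORT B =====
-- copy phase (nested comprehension), then overwrite rows 0 and 3 and columns 0 and 4
def transf_alt (m : List (List Int)) : List (List Int) :=
  let n := (PySem.List.pyRange 0 4 1).map (fun i =>
    (PySem.List.pyRange 0 5 1).map (fun j => PySem.List.pyGetD (PySem.List.pyGetD m i []) j 0))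
  let n := n.set 0 [0, 0, 0, 0, 0]
  let n := n.set 3 [0, 0, 0, 0, 0]
  (PySem.List.pyRange 0 4 1).foldl (fun n i =>
    let n := n.set i.toNat ((n.getD i.toNat []).set 0 0)
    n.set i.toNat ((n.getD i.toNat []).set 4 0)) n

-- ===== PRECONDITION & SPEC =====
-- Pre_: Python A indexes m[i][j] for all i<4, j<5 before branching, so it raises
-- IndexError unless m has at least 4 rows whose first 4 each have at least 5 entries.
def Pre_transf (m : List (List Int)) : Prop :=
  4 ≤ m.length ∧ ∀ r ∈ m.take 4, 5 ≤ r.length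
instance (m : List (List Int)) : Decidable (Pre_transf m) := by unfold Pre_transf; infer_instance
def pvWitness_transf : List (List Int) :=
  [[1,2,3,4,5],[6,7,8,9,10],[11,12,13,14,15],[16,17,18,19,20]]
def Spec_transf (m : List (List Int)) (out : List (List Int)) : Prop := out = transf_alt m
instance (m : List (List Int)) (out : List (List Int)) : Decidable (Spec_transf m out) := by unfold Spec_transf; infer_instance

-- ===== CLAIM (what is proved, stated in full; the proofs are below) =====
def Claim_equal_transf : Prop := ∀ (m : List (List Int)), Dom_transf m → Pre_transf m → Spec_transf m (transf m)

-- ===== LEMMAS AND PROOFS =====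
theorem pyRange04 : PySem.List.pyRange 0 4 1 = [0, 1, 2, 3] := by decide
theorem pyRange05 : PySem.List.pyRange 0 5 1 = [0, 1, 2, 3, 4] := by decide

-- ===== VERDICT (by name: the statement is the Claim_ definition above) =====
theorem transf_spec : Claim_equal_transf := by
  intro m _ _
  unfold Spec_transf transf transf_alt
  simp [pyRange04, pyRange05, List.foldl, List.map, List.set]
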